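/-
  `Final.ImageFacts` DISCHARGED FOR THE IMAGE OF THE THEOREMS: the hypothesis of the end theorem (`Final.Statement`, Vorbis/Spec/Final.lean)
  about the file's bytes holds of `Vorbis.imageV5` (Vorbis/ImageV5.lean: c/vorbis_f.bin, 137,536 bytes, as one number).

      start_image_any           the image's bytes are in the start state's memory from 100000H, at ANY privilege level `c` (`start_image`
                                of Vorbis/Start.lean asks `c = 0 ∨ c = 3`; three fields of `ImageFacts` quantify over every `c`)
      image_ok                  `Image.OK`: sizes and the four marks of link.ld
      image_codeNat             the whole file as the number: `CodeNat mem 100000H imageV5Nat imageV5Nat.size`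
      FileHas a n M             "the `n` bytes at address `a` of the file are the number `M`": `a` is inside the file as loaded at 100000H
                                and `(imageV5Nat >>> (8 * (a - 100000H))) % 2 ^ (8 * n) = M` — a CLOSED, DECIDABLE fact about numbers:
                                `by decide +kernel`, three big-number operations of the kernel whatever the offset (≈ 1 ms)
      image_slice, image_readLE `FileHas a n M` ⊢ the start state has `CodeNat mem a M n`; its little-endian load there gives `M`
      image_hasCode             `FileHas entry.toNat size N` ⊢ `HasCodeNat (startLayout c hc) (startU …) entry N size`
      Final.ok_v5               `Image.OK`
      Final.code_v5             `AllCode` of the start state: all 116 functions, one `FileHas` each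
      Final.ctor_v5             `.init_array` holds the address of `_sub_I_65535_1`
      Final.descs_v5            the six descriptors of `.data..LASAN0`
      Final.consts_v5           the contents of `log2_4` and `range_list`
      Final.imageFacts_v5       `Final.ImageFacts imageV5`
      Final.v5                  the end theorem for THIS image from the stub's statement and the closed contracts (`Final.of_top`):
                                no hypothesis about the file is left

  Nothing here evaluates the byte array: `imageV5` is `User.imageOfNat imageV5Nat imageV5Nat.size`, used only through `imageV5_size`
  and `imageV5_codeNat` (Vorbis/ImageV5.lean). Every number comes from the tree's generated tables by NAME (`Vorbis.L.<fn>.entry`,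
  `.size`, `Vorbis.Code.code_<fn>.nat`, `Vorbis.symbols`, `Vorbis.Globals`, `imageV5Nat.size`): after a rebuild of the image this
  file is rebuilt, not edited. Elaboration: 0.6 s and 85 MB over its imports.
-/
import Vorbis.Spec.Final
import Vorbis.ImageV5
namespace Vorbis
open X86 X86.User Asan

/- The slice equations contain `2 ^ (8 * n)` with `n` up to 12 KB: above the elaborator's default threshold for evaluating a power
(the kernel has none). -/
set_option exponentiation.threshold 2000000

/-! ### The start state's memory on the image, at any privilege level -/

/-- The file's bytes are in the flat memory of the start state from 1 MB, whatever the privilege level (the model's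
`User.startState_image` goes through the page tables of `c = 0` and `c = 3`; the physical memory above 1 MB does not depend
on them). -/
theorem startState_image_any (c : Nat) (img : ByteArray) (entry rsp : Word) (hs : img.size ≤ 0x1000000)
    (i : Nat) (hi : i < img.size) :
    (User.startState c img entry rsp).mem.read (0x100000 + UInt64.ofNat i) = img.get! i := by
  have hk : (0x100000 : Word).toNat + img.size < 2 ^ 64 := by
    simp only [UInt64.reduceToNat]
    omega
  show (Boot.loadImage (bootMachine c) 0x100000 img).phys.read _ = _
  rw [loadImage_phys]
  exact read_loadPhys_in _ _ _ i hk hi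

/-- **The image's bytes are in memory from 100000H, at any privilege level.** -/
theorem start_image_any (im : Image) (him : im.OK) (c : Nat) (inp : List UInt8) :
    CodeAt (startU im c inp).mem 0x100000 im.bytes.toList := by
  intro i hi
  have hsz := him.size
  have hend := him.end_le
  have hi' : i < im.bytes.size := by
    rw [Array.length_toList] at hi
    exact hi
  have hfile : i < (file im inp).size := by
    rw [file_size]
    omega
  have hread : (startU im c inp).mem.read (0x100000 + UInt64.ofNat i) = (file im inp).get! i :=
    startState_image_any c (file im inp) im.entry RSP0 (file_size_le im inp) i hfile
  rw [hread, file_get im inp i (by omega)]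
  unfold memByte
  have c1 : ¬ (0xC00000 ≤ 0x100000 + i ∧ 0x100000 + i < 0xE00000) := by omega
  have c2 : ¬ (0x200000 ≤ 0x100000 + i ∧ 0x100000 + i < 0x200000 + inp.length) := by omega
  have c3 : ¬ ((0x1FF000 ≤ 0x100000 + i ∧ 0x100000 + i < 0x1FF020) ∨ (0x1FF030 ≤ 0x100000 + i ∧ 0x100000 + i < 0x1FF040)) := by
    omega
  have c4 : 0x100000 ≤ 0x100000 + i ∧ 0x100000 + i < 0x100000 + im.bytes.size := by omega
  rw [if_neg c1, if_neg c2, if_neg c3, if_pos c4]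
  have e2 : 0x100000 + i - 0x100000 = i := by omega
  rw [e2, Array.getD_eq_getD_getElem?, Array.getElem?_eq_getElem hi', Option.getD_some, Array.getElem_toList]

/-! ### The image of the theorems

KERNEL HYGIENE: the kernel knows no `irreducible`. A definitional comparison in which `imageV5` stands on one side and something
that only REDUCES to it on the other (`(symbols.image imageV5).bytes`) can make it unfold the 137,536-element `Array.ofFn`
(measured: 299 s, 46 GB, then a deterministic timeout). So every fact about `symbols.image bytes` is proved for a VARIABLE `bytes`
and then instantiated: at `imageV5` all comparisons are syntactic. -/

/-- What link.ld asserts, for this build's symbols and any file of `n` bytes: four comparisons of numbers. -/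
theorem image_ok_of (bytes : Array UInt8) (n : Nat) (hsize : bytes.size = n)
    (h1 : 0x100000 + n ≤ symbols.image_end) (h2 : symbols.image_end ≤ 0x1F0000)
    (h3 : symbols.text_end ≤ 0x100000 + n) (h4 : 0x100000 ≤ symbols.text_end) : (symbols.image bytes).OK := by
  subst hsize
  exact ⟨h1, h2, h3, h4⟩

/-- **What link.ld asserts holds of the image**: the file ends below `__image_end`, which is below 1F0000H; `__text_end` is inside
the file. -/
theorem image_ok : (symbols.image imageV5).OK :=
  image_ok_of imageV5 imageV5Nat.size imageV5_size (by decide) (by decide) (by decide) (by decide)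

/-- The file's bytes are in the start state's memory from 100000H, for this build's symbols and any file. -/
theorem image_codeAt_of (bytes : Array UInt8) (him : (symbols.image bytes).OK) (c : Nat) (inp : List UInt8) :
    CodeAt (startU (symbols.image bytes) c inp).mem 0x100000 bytes.toList :=
  start_image_any (symbols.image bytes) him c inp

/-- **The whole file, as the number, is in the start state's memory from 100000H.** -/
theorem image_codeNat (c : Nat) (inp : List UInt8) :
    CodeNat (startU (symbols.image imageV5) c inp).mem 0x100000 imageV5Nat imageV5Nat.size :=
  imageV5_codeNat (image_codeAt_of imageV5 image_ok c inp)

/-- **The `n` bytes at address `a` of the file are the number `M`**: a closed fact about numbers (the address is inside the file as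
loaded at 100000H; the slice of the file's number there is `M`), which the kernel decides with three big-number operations. -/
abbrev FileHas (a n M : Nat) : Prop :=
  0x100000 ≤ a ∧ a + n ≤ 0x100000 + imageV5Nat.size ∧ (imageV5Nat >>> (8 * (a - 0x100000))) % 2 ^ (8 * n) = M

/-- The file, loaded at 100000H, ends below E00000H: inside the user region of the start layout. -/
theorem file_end_le : 0x100000 + imageV5Nat.size ≤ 0xE00000 := by
  decide

/-- Whatever is inside the file is inside the user region. -/
theorem fileHas_le {a n M : Nat} (h : FileHas a n M) : a + n ≤ 0xE00000 := by
  have hend : 0x100000 + imageV5Nat.size ≤ 0xE00000 := file_end_le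
  have h2 : a + n ≤ 0x100000 + imageV5Nat.size := h.2.1
  clear h
  omega

/-- The offset in the file of what is inside the file. (The equation between the big numbers is kept away from `omega`.) -/
theorem fileHas_off {a n M : Nat} (h : FileHas a n M) : a - 0x100000 + n ≤ imageV5Nat.size := by
  have h1 : 0x100000 ≤ a := h.1
  have h2 : a + n ≤ 0x100000 + imageV5Nat.size := h.2.1
  clear h
  omega

/-- **What the file has at `a` is in the start state's memory at `a`.** -/
theorem image_slice (c : Nat) (inp : List UInt8) (a n M : Nat) (h : FileHas a n M) :
    CodeNat (startU (symbols.image imageV5) c inp).mem (UInt64.ofNat a) M n := by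
  have hs := (image_codeNat c inp).slice (a - 0x100000) n M (fileHas_off h) h.2.2
  have ea : (0x100000 : Word) + UInt64.ofNat (a - 0x100000) = UInt64.ofNat a := by
    have h1 : 0x100000 ≤ a := h.1
    have e0 : (0x100000 : Word) = UInt64.ofNat 0x100000 := rfl
    have e1 : 0x100000 + (a - 0x100000) = a := by
      clear hs h
      omega
    rw [e0, ← UInt64.ofNat_add, e1]
  rw [ea] at hs
  exact hs

/-- **The little-endian load of `n` bytes at address `a` of the image gives what the file has there.** -/
theorem image_readLE (c : Nat) (inp : List UInt8) (a n M : Nat) (h : FileHas a n M) :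
    (startU (symbols.image imageV5) c inp).mem.readLE (UInt64.ofNat a) n = M := by
  rw [(image_slice c inp a n M h).readLE, ← h.2.2]
  have e256 : 256 ^ n = 2 ^ (8 * n) := by
    rw [Nat.pow_mul]
  rw [e256, Nat.mod_mod]

/-- **The code of a function is in the start state**, from "the file has the function's number at its entry". -/
theorem image_hasCode (c : Nat) (hc : c = 0 ∨ c = 3) (inp : List UInt8) (entry : Word) (N size : Nat)
    (h : FileHas entry.toNat size N) :
    HasCodeNat (startLayout c hc) (startU (symbols.image imageV5) c inp) entry N size := by
  have hs := image_slice c inp entry.toNat size N h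
  rw [UInt64.ofNat_toNat] at hs
  exact ⟨hs, start_layout_has c hc entry size h.1 (fileHas_le h)⟩

namespace Spec.Final

/-! ### The five fields of `ImageFacts` -/

/-- `Image.OK` of the image. -/
theorem ok_v5 : (Vorbis.symbols.image imageV5).OK := Vorbis.image_ok

/-- **The code of all 116 functions is in the start state.** One goal per field of `AllCode`, all closed the same way: the file
has the function's number (`Vorbis.Code.code_<fn>.nat`, `Vorbis.L.<fn>.size` bytes) at the function's entry (`Vorbis.L.<fn>.entry`)
— a fact about closed numbers, decided by the kernel. A function whose bytes differ from the file's makes its goal (named after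
the field) fail. -/
theorem code_v5 (c : Nat) (hc : c = 0 ∨ c = 3) (inp : List UInt8) :
    AllCode (startLayout c hc) (startU (Vorbis.symbols.image imageV5) c inp) := by
  constructor
  all_goals exact image_hasCode c hc inp _ _ _ (by decide +kernel)

/-- `.init_array` as numbers: one entry; the file has the address of `_sub_I_65535_1` there. -/
theorem ctor_numbers :
    rt.sym.initArrayEnd = rt.sym.initArrayStart + 8 ∧ FileHas rt.sym.initArrayStart 8 rt.sym.ctor.toNat := by
  decide +kernel

/-- **`.init_array` is in the image**: one entry, the address of `_sub_I_65535_1`. -/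
theorem ctor_v5 (c : Nat) (inp : List UInt8) :
    CtorIn (startU (Vorbis.symbols.image imageV5) c inp).mem rt.sym := by
  obtain ⟨hend, hfile⟩ := ctor_numbers
  refine ⟨hend, ?_⟩
  rw [image_readLE c inp _ 8 _ hfile, UInt64.ofNat_toNat]

/-- The descriptor table as numbers: the three quadwords of descriptor `i` in the file. -/
theorem descs_numbers : ∀ i (h : i < rt.descs.length),
    FileHas (rt.table + 64 * i) 8 rt.descs[i].beg ∧
    FileHas (rt.table + 64 * i + 8) 8 rt.descs[i].size ∧
    FileHas (rt.table + 64 * i + 16) 8 rt.descs[i].sizeRz := by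
  decide +kernel

/-- **The descriptor table of the six globals (`.data..LASAN0`) is in the image.** -/
theorem descs_v5 (c : Nat) (inp : List UInt8) :
    DescsIn (startU (Vorbis.symbols.image imageV5) c inp).mem rt.table rt.descs := by
  intro i h
  obtain ⟨n1, n2, n3⟩ := descs_numbers i h
  exact ⟨image_readLE c inp _ 8 _ n1, image_readLE c inp _ 8 _ n2, image_readLE c inp _ 8 _ n3⟩

/-- The sixteen bytes of `log2_4` in the file. -/
theorem log2_4_numbers : ∀ i, i < 16 → FileHas (Vorbis.Globals.log2_4.beg + i) 1 (log2_4Table.getD i 0) := by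
  decide +kernel

/-- The four `int`s of `range_list` in the file: 256, 128, 86, 64. -/
theorem range_list_numbers :
    FileHas Vorbis.Globals.range_list.beg 4 256 ∧ FileHas (Vorbis.Globals.range_list.beg + 4) 4 128 ∧
    FileHas (Vorbis.Globals.range_list.beg + 8) 4 86 ∧ FileHas (Vorbis.Globals.range_list.beg + 12) 4 64 := by
  decide +kernel

/-- The `int` at `a` of the start state, when the file has the number `M < 2 ^ 31` there. -/
theorem image_i32 (c : Nat) (inp : List UInt8) (a M : Nat) (h : FileHas a 4 M) (hM : M < 2147483648) :
    (startU (Vorbis.symbols.image imageV5) c inp).mem.i32 a = (M : Int) := by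
  unfold Mem.i32 Mem.u32 addr sint32
  rw [image_readLE c inp a 4 M h, if_pos hM]

/-- **The contents of the two tables the decoder reads as constants** (`log2_4`, `range_list`) are in the image. -/
theorem consts_v5 (c : Nat) (inp : List UInt8) :
    Consts (startU (Vorbis.symbols.image imageV5) c inp).mem := by
  obtain ⟨r0, r1, r2, r3⟩ := range_list_numbers
  constructor
  · intro i hi
    exact image_readLE c inp _ 1 _ (log2_4_numbers i hi)
  · exact ⟨image_i32 c inp _ 256 r0 (by omega), image_i32 c inp _ 128 r1 (by omega), image_i32 c inp _ 86 r2 (by omega),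
      image_i32 c inp _ 64 r3 (by omega)⟩

/-! ### The hypothesis of the end theorem, for this image -/

/-- **`Final.ImageFacts` holds of the image of the theorems.** -/
theorem imageFacts_v5 : ImageFacts imageV5 where
  ok := ok_v5
  code := code_v5
  ctor := ctor_v5
  descs := descs_v5
  consts := consts_v5

/-- **THE END THEOREM FOR THIS IMAGE**, from the stub's statement and the two closed contracts at every layout with the code in
place (what the bottom-up composition of the units ends in): on every processor the proof covers, at ring 0 and at ring 3, whatever
the input, the run from the start machine of c/vorbis_f.bin reaches `vorbis_exit` and RIP stays inside the image's code and off
`__asan_report`. No hypothesis about the file's bytes is left: `Final.Statement`'s `ImageFacts` is `imageFacts_v5`. -/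
theorem v5 (hstub : start_vorbis.Statement)
    (hclosed : ∀ (Lay : Layout) (_ : Lay.hi = 0x1000000) (μ : Microarch) (_ : UserX.MicroOK μ) (u₀ : State),
      AllCode Lay u₀ → ClosedTop Lay μ u₀) :
    Vorbis.VorbisStaysInCode (Vorbis.symbols.image imageV5) :=
  of_top hstub hclosed imageV5 imageFacts_v5

end Spec.Final
end Vorbis
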